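-- pv_equiv track=rewrite | github.com/psyfb2/Chatbot | models/text_preprocessing.py | generate_segment_array
-- ===== SOURCE A (Python) =====
-- SEP_SEQ_TOKEN   = "sepseqq"
--
-- SEGMENT_PERSONA_INDEX   = 1
--
-- SEGMENT_MESSAGE_INDEX   = 2
--
-- def generate_segment_array(sentence, pad_length, no_persona=False):
--     ''' Generates a list of segment indicies based on the SEP_SEQ_TOKEN found in sentence '''
--     sep_seq_found = no_persona
--     segment = []
--     c = 0
--
--     for word in sentence.split(' '):
--         if c >= pad_length:
--             break
--
--         if sep_seq_found:
--             # message segment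
--             segment.append(SEGMENT_MESSAGE_INDEX)
--         else:
--             # persona segment
--             segment.append(SEGMENT_PERSONA_INDEX)
--         if word == SEP_SEQ_TOKEN:
--             sep_seq_found = True
--         c += 1
--
--     # pad the segment array
--     for i in range(pad_length - len(segment)):
--         segment.append(0)
--
--     return segment
-- ===== SOURCE B (Python) =====
-- SEP_SEQ_TOKEN = "sepseqq"
-- SEGMENT_PERSONA_INDEX = 1
-- SEGMENT_MESSAGE_INDEX = 2
--
-- def generate_segment_array(sentence, pad_length, no_persona=False):
--     words = sentence.split(' ')
--     try:
--         sep = words.index(SEP_SEQ_TOKEN)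
--     except ValueError:
--         sep = len(words)
--     n = min(len(words), max(pad_length, 0))
--     segment = [SEGMENT_MESSAGE_INDEX if (no_persona or i > sep) else SEGMENT_PERSONA_INDEX
--                for i in range(n)]
--     return segment + [0] * (pad_length - n)
-- ===== Notes on version B (the rewrite author's own statement) =====
-- stated objective: simpler
-- what changed: B locates the separator index once with list.index and builds the segment as a positional comprehension over min(len(words), pad_length), instead of threading a running boolean flag and counter through an explicit loop with break; padding becomes list repetition.
import Mathlib
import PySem

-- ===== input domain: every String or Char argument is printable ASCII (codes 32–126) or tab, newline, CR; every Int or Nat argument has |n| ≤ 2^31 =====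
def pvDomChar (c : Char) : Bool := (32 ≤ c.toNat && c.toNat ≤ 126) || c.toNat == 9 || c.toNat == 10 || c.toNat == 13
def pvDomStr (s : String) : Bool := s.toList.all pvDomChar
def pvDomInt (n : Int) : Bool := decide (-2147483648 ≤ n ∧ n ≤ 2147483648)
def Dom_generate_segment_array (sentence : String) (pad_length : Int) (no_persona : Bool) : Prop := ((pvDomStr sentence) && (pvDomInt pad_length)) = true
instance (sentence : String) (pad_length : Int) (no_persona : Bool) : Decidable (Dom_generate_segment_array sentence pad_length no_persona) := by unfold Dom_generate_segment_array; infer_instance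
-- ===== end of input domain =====

-- B replaces A's running boolean flag + counter loop by locating the separator
-- index once and building the segment as a positional map (objective: simpler).

-- ===== PORT A =====
-- the for-loop of A: state is (sep_seq_found, segment, c)
def genSegLoopA : List String → Bool → List Int → Int → Int → List Int
  | [], _, seg, _, _ => seg
  | w :: ws, found, seg, c, pad =>
    if c ≥ pad then seg
    else genSegLoopA ws (if w = "sepseqq" then true else found)
           (seg ++ [if found then (2 : Int) else 1]) (c + 1) pad

def generate_segment_array (sentence : String) (pad_length : Int) (no_persona : Bool) : List Int :=
  let seg := genSegLoopA ((PySem.Str.split? sentence " ").getD []) no_persona [] 0 pad_length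
  -- for i in range(pad_length - len(segment)): segment.append(0)
  (PySem.List.pyRange 0 (pad_length - (seg.length : Int)) 1).foldl (fun acc _ => acc ++ [(0 : Int)]) seg

-- ===== PORT B =====
def generate_segment_array_alt (sentence : String) (pad_length : Int) (no_persona : Bool) : List Int :=
  let words := (PySem.Str.split? sentence " ").getD []
  -- try: sep = words.index(SEP_SEQ_TOKEN) except ValueError: sep = len(words)
  let sep : Int := match PySem.List.index? words "sepseqq" with
    | some k => (k : Int)
    | none => (words.length : Int)
  let n : Int := min (words.length : Int) (max pad_length 0)
  let segment := (PySem.List.pyRange 0 n 1).map (fun i => if no_persona || i > sep then (2 : Int) else 1)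
  segment ++ List.replicate (pad_length - n).toNat 0

-- ===== PRECONDITION & SPEC =====
def Spec_generate_segment_array (sentence : String) (pad_length : Int) (no_persona : Bool) (out : List Int) : Prop := out = generate_segment_array_alt sentence pad_length no_persona
instance (sentence : String) (pad_length : Int) (no_persona : Bool) (out : List Int) : Decidable (Spec_generate_segment_array sentence pad_length no_persona out) := by unfold Spec_generate_segment_array; infer_instance

-- ===== CLAIM (what is proved, stated in full; the proofs are below) =====
def Claim_equal_generate_segment_array : Prop := ∀ (sentence : String) (pad_length : Int) (no_persona : Bool), Dom_generate_segment_array sentence pad_length no_persona → Spec_generate_segment_array sentence pad_length no_persona (generate_segment_array sentence pad_length no_persona)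

-- ===== LEMMAS AND PROOFS =====

-- the part of the segment that A's main loop appends, as a standalone function
def fSeg : List String → Bool → Int → List Int
  | [], _, _ => []
  | w :: ws, found, pad =>
    if pad ≤ 0 then []
    else (if found then (2 : Int) else 1) :: fSeg ws (if w = "sepseqq" then true else found) (pad - 1)

-- B's separator index, as a standalone function
def sIdx (ws : List String) : Int :=
  match PySem.List.index? ws "sepseqq" with
  | some k => (k : Int)
  | none => (ws.length : Int)

lemma sIdx_nonneg (ws : List String) : 0 ≤ sIdx ws := by
  unfold sIdx; cases PySem.List.index? ws "sepseqq" <;> simp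

lemma genSegLoopA_eq_fSeg (ws : List String) :
    ∀ (found : Bool) (seg : List Int) (c pad : Int),
      genSegLoopA ws found seg c pad = seg ++ fSeg ws found (pad - c) := by
  induction ws with
  | nil => intro found seg c pad; simp [genSegLoopA, fSeg]
  | cons w ws ih =>
    intro found seg c pad
    by_cases h : c ≥ pad
    · rw [genSegLoopA, if_pos h, fSeg, if_pos (by omega)]; simp
    · rw [genSegLoopA, if_neg h, ih]
      have h2 : pad - (c + 1) = pad - c - 1 := by omega
      rw [h2]
      conv_rhs => rw [fSeg]
      rw [if_neg (show ¬ (pad - c ≤ 0) by omega)]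
      simp

lemma fSeg_eq_map (ws : List String) :
    ∀ (b : Bool) (pad : Int),
      fSeg ws b pad =
        (PySem.List.pyRange 0 (min (ws.length : Int) (max pad 0)) 1).map
          (fun i => if b || i > sIdx ws then (2 : Int) else 1) := by
  induction ws with
  | nil =>
    intro b pad
    simp [fSeg]
  | cons w ws ih =>
    intro b pad
    by_cases hp : pad ≤ 0
    · have : min (((w :: ws).length : Int)) (max pad 0) = 0 := by
        simp; omega
      rw [fSeg, if_pos hp, this, PySem.List.pyRange_zero]; simp
    · have hn : (0:Int) < min (((w :: ws).length : Int)) (max pad 0) := by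
        simp; omega
      rw [fSeg, if_neg hp,
          PySem.List.pyRange_one_cons hn, List.map_cons]
      have hhead : (if b || (0:Int) > sIdx (w :: ws) then (2:Int) else 1) = if b then (2:Int) else 1 := by
        have := sIdx_nonneg (w :: ws)
        have : ¬ ((0:Int) > sIdx (w :: ws)) := by omega
        simp [this]
      rw [hhead]
      congr 1
      rw [ih]
      -- rewrite both ranges to List.range maps and compare elementwise
      have harith : (min (((w :: ws).length : Int)) (max pad 0) - (0 + 1)).toNat
          = (min ((ws.length : Int)) (max (pad - 1) 0) - 0).toNat := by
        simp only [List.length_cons]; push_cast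
        have hl : (0:Int) ≤ (ws.length : Int) := by positivity
        omega
      rw [PySem.List.pyRange_one, PySem.List.pyRange_one, harith, List.map_map, List.map_map]
      apply List.map_congr_left
      intro k _
      simp only [Function.comp]
      by_cases hw : w = "sepseqq"
      · have hs : sIdx (w :: ws) = 0 := by
          subst hw; unfold sIdx; rw [PySem.List.index?_cons_self]; rfl
        subst hw
        simp [hs]
        intros; omega
      · have hs : sIdx (w :: ws) = sIdx ws + 1 := by
          unfold sIdx
          rw [PySem.List.index?_cons_of_ne _ hw]
          rcases PySem.List.index? ws "sepseqq" with _ | j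
          · simp only [Option.map_none, List.length_cons]; push_cast; ring
          · simp only [Option.map_some]; push_cast; ring
        have hiff : ((0:Int) + 1 + (k:Int) > sIdx ws + 1) ↔ ((0:Int) + (k:Int) > sIdx ws) := by omega
        simp only [if_neg hw, hs, hiff]

lemma foldl_append_zero (l : List Int) :
    ∀ seg : List Int, l.foldl (fun acc _ => acc ++ [(0 : Int)]) seg = seg ++ List.replicate l.length 0 := by
  induction l with
  | nil => intro seg; simp
  | cons x l ih => intro seg; simp [List.foldl_cons, ih, List.replicate_succ]

-- ===== VERDICT (by name: the statement is the Claim_ definition above) =====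
theorem generate_segment_array_spec : Claim_equal_generate_segment_array := by
  intro sentence pad_length no_persona _
  unfold Spec_generate_segment_array generate_segment_array generate_segment_array_alt
  set ws := (PySem.Str.split? sentence " ").getD [] with hws
  rw [genSegLoopA_eq_fSeg, fSeg_eq_map]
  simp only [List.nil_append, sub_zero]
  set n : Int := min ((ws.length : Int)) (max pad_length 0) with hn
  have hsep : (match PySem.List.index? ws "sepseqq" with
    | some k => (k : Int)
    | none => (ws.length : Int)) = sIdx ws := rfl
  rw [hsep, foldl_append_zero]
  congr 1
  · rw [PySem.List.length_pyRange_one]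
    have h1 : 0 ≤ n := by have : (0:Int) ≤ (ws.length : Int) := by positivity
                          omega
    have h2 : pad_length ≥ 0 → n ≤ pad_length := by omega
    congr 1
    simp [PySem.List.length_pyRange_one]
    omega
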